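-- pv_equiv track=rewrite | github.com/OpenMDAO/OpenMDAO | openmdao/utils/code_utils.py | _get_return_names
-- ===== SOURCE A (Python) =====
-- def _get_return_names(outs):
--     """
--     Return a list of (name or None) for each return value.
--
--     If there are multiple returns that differ by name or number of return values, an exception
--     will be raised.  If one entry in one return list has a name and another is None, the name
--     will take precedence and no exception will be raised.
--
--     Returns
--     -------
--     list
--         The list of return names.  Some entries will be None if there was no simple name
--         associated with a given return value.
--     """
--     if len(outs) == 0:
--         return []
--     if len(outs) == 1:
--         return outs[0]
--
--     names = outs[0].copy()
--     length = len(names)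
--     for lst in outs[1:]:
--         if len(lst) != length:
--             raise RuntimeError("Function has multiple return statements with differing numbers "
--                                "of return values.")
--
--         for i, (name, newname) in enumerate(zip(names, lst)):
--             if name is None:
--                 names[i] = newname
--             elif newname is not None and name != newname:
--                 raise RuntimeError("Function has multiple return statements with different "
--                                    f"return value names of {sorted((name, newname))} for "
--                                    f"return value {i}.")
--     return names
-- ===== SOURCE B (Python) =====
-- def _get_return_names(outs):
--     """Column-wise merge of return-name lists; matches A's return value wherever A returns."""
--     if len(outs) == 0:
--         return []
--     if len(outs) == 1:
--         return outs[0]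
--     length = len(outs[0])
--     for lst in outs:
--         if len(lst) != length:
--             raise RuntimeError("Function has multiple return statements with differing numbers "
--                                "of return values.")
--     result = []
--     for i in range(length):
--         chosen = None
--         for lst in outs:
--             v = lst[i]
--             if chosen is None:
--                 chosen = v
--             elif v is not None and v != chosen:
--                 raise RuntimeError("Function has multiple return statements with different "
--                                    f"return value names of {sorted((chosen, v))} for "
--                                    f"return value {i}.")
--         result.append(chosen)
--     return result
-- ===== Notes on version B (the rewrite author's own statement) =====
-- stated objective: alternative
-- what changed: Row-major in-place merge over a mutated names list replaced by a column-wise (transposed) traversal: one up-front length check, then each output position is computed independently as the first non-None entry of its column.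
import Mathlib
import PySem

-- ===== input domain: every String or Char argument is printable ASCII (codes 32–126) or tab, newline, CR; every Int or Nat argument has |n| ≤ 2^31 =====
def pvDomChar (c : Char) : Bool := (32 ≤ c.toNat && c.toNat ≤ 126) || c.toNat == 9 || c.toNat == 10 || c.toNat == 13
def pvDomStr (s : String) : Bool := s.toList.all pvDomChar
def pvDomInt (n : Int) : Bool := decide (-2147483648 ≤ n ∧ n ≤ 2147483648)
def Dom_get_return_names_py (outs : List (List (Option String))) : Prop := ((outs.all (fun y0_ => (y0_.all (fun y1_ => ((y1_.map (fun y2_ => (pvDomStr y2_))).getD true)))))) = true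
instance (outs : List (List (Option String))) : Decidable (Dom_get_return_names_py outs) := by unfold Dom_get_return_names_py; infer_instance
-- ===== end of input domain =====

-- B replaces A's row-major in-place merge by a column-wise traversal (up-front length
-- check, then each output position computed independently); objective: alternative.


-- ===== PORT A =====
-- inner loop of A: walk names and lst in lockstep; None in names is replaced by the new
-- entry, two differing names raise (= none here, the RuntimeError case, excluded by Pre_).
def aZip : List (Option String) → List (Option String) → Option (List (Option String))
  | [], _ => some []
  | _ :: _, [] => some []
  | none :: ns, m :: ms => (aZip ns ms).map (fun r => m :: r)
  | some s :: ns, none :: ms => (aZip ns ms).map (fun r => some s :: r)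
  | some s :: ns, some t :: ms =>
      if s = t then (aZip ns ms).map (fun r => some s :: r) else none

-- outer loop of A over outs[1:]; none = RuntimeError (length mismatch or name conflict).
def aLoop : List (Option String) → List (List (Option String)) → Option (List (Option String))
  | names, [] => some names
  | names, lst :: rest =>
      if lst.length ≠ names.length then none
      else match aZip names lst with
        | none => none
        | some names' => aLoop names' rest

def get_return_names_py (outs : List (List (Option String))) : List (Option String) :=
  match outs with
  | [] => []
  | x :: rest =>
    match rest with
    | [] => x
    | _ :: _ => (aLoop x rest).getD []   -- none = RuntimeError, excluded by Pre_

-- ===== PORT B =====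
-- B's inner column scan: keep the first non-None value; a later differing non-None
-- value raises (= none, excluded by Pre_).
def bCol : Option String → List (Option String) → Option (Option String)
  | chosen, [] => some chosen
  | none, v :: rest => bCol v rest
  | some s, none :: rest => bCol (some s) rest
  | some s, some t :: rest => if t ≠ s then none else bCol (some s) rest

-- l.getD i none = lst[i] of Source B: exact because i < length is guaranteed by the length check.
def get_return_names_py_alt (outs : List (List (Option String))) : List (Option String) :=
  match outs with
  | [] => []
  | x :: rest =>
    match rest with
    | [] => x
    | _ :: _ =>
      if (x :: rest).any (fun l => l.length != x.length) then []  -- RuntimeError, excluded by Pre_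
      else (((List.range x.length).mapM
              (fun i => bCol none ((x :: rest).map (fun l => l.getD i none)))).getD [])

-- ===== PRECONDITION & SPEC =====
-- Pre_ excludes exactly the inputs on which A raises RuntimeError: with ≥ 2 return lists,
-- a list of a different length than the first, or two differing non-None names at the
-- same position.  B raises there too.
def Pre_get_return_names_py (outs : List (List (Option String))) : Prop :=
  (∀ l ∈ outs, l.length = (outs.headD []).length) ∧
  (∀ i ∈ List.range (outs.headD []).length, ∀ l1 ∈ outs, ∀ l2 ∈ outs,
    l1.getD i none = none ∨ l2.getD i none = none ∨ l1.getD i none = l2.getD i none)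
instance (outs : List (List (Option String))) : Decidable (Pre_get_return_names_py outs) := by
  unfold Pre_get_return_names_py; infer_instance

def pvWitness_get_return_names_py : List (List (Option String)) :=
  [[some "a", none], [none, some "b"]]

def Spec_get_return_names_py (outs : List (List (Option String))) (out : List (Option String)) : Prop := out = get_return_names_py_alt outs
instance (outs : List (List (Option String))) (out : List (Option String)) : Decidable (Spec_get_return_names_py outs out) := by unfold Spec_get_return_names_py; infer_instance

-- ===== CLAIM (what is proved, stated in full; the proofs are below) =====
def Claim_equal_get_return_names_py : Prop := ∀ (outs : List (List (Option String))), Dom_get_return_names_py outs → Pre_get_return_names_py outs → Spec_get_return_names_py outs (get_return_names_py outs)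

-- ===== LEMMAS AND PROOFS =====

/-- First-some of two options (what one merging step of A computes per position). -/
def merge2 (a b : Option String) : Option String :=
  match a with
  | none => b
  | some s => some s

/-- One outer-loop step of A, as a pure list. -/
def mergeL (a b : List (Option String)) : List (Option String) :=
  List.zipWith merge2 a b

/-- First non-None down column `i` of `outs`. -/
def colFind (i : ℕ) : List (List (Option String)) → Option String
  | [] => none
  | l :: rest => merge2 (l.getD i none) (colFind i rest)

/-- First non-None of a single column list. -/
def firstSome : List (Option String) → Option String
  | [] => none
  | v :: rest => merge2 v (firstSome rest)

lemma merge2_assoc (a b c : Option String) :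
    merge2 (merge2 a b) c = merge2 a (merge2 b c) := by
  cases a <;> cases b <;> rfl

lemma getD_of_len_le (l : List (Option String)) (i : ℕ) (h : l.length ≤ i) :
    l.getD i none = none := by
  simp [List.getD_eq_getElem?_getD, List.getElem?_eq_none h]

lemma mergeL_len (a b : List (Option String)) (h : b.length = a.length) :
    (mergeL a b).length = a.length := by
  simp [mergeL, h]

lemma mergeL_getD (a b : List (Option String)) (h : b.length = a.length) (i : ℕ) :
    (mergeL a b).getD i none = merge2 (a.getD i none) (b.getD i none) := by
  by_cases hi : i < a.length
  · simp [mergeL, List.getD_eq_getElem?_getD, List.getElem?_zipWith,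
      List.getElem?_eq_getElem (l := a) hi, List.getElem?_eq_getElem (l := b) (h ▸ hi)]
  · rw [getD_of_len_le a i (by omega), getD_of_len_le b i (by omega),
      getD_of_len_le _ i (by rw [mergeL_len a b h]; omega)]
    rfl

/-- compat: two option values do not conflict. -/
def compat (a b : Option String) : Prop := a = none ∨ b = none ∨ a = b

lemma compat_merge2_left (a b c : Option String)
    (hac : compat a c) (hbc : compat b c) : compat (merge2 a b) c := by
  cases a with
  | none => exact hbc
  | some s => exact hac

lemma aZip_eq (ns : List (Option String)) : ∀ (ms : List (Option String)),
    (∀ i, compat (ns.getD i none) (ms.getD i none)) →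
    aZip ns ms = some (mergeL ns ms) := by
  induction ns with
  | nil => intro ms _; cases ms <;> rfl
  | cons n ns ih =>
    intro ms h
    cases ms with
    | nil => rfl
    | cons m ms =>
      have htail : ∀ i, compat (ns.getD i none) (ms.getD i none) := fun i => h (i + 1)
      cases n with
      | none => simp [aZip, ih ms htail, mergeL, merge2]
      | some s =>
        cases m with
        | none => simp [aZip, ih ms htail, mergeL, merge2]
        | some t =>
          have h0 := h 0
          simp only [List.getD, compat] at h0
          have hst : s = t := by
            rcases h0 with h0 | h0 | h0 <;> simp_all
          simp [aZip, hst, ih ms htail, mergeL, merge2]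

lemma aLoop_eq (rest : List (List (Option String))) : ∀ (names : List (Option String)),
    (∀ l ∈ rest, l.length = names.length) →
    (∀ i, ∀ l ∈ rest, compat (names.getD i none) (l.getD i none)) →
    (∀ i, ∀ l1 ∈ rest, ∀ l2 ∈ rest, compat (l1.getD i none) (l2.getD i none)) →
    aLoop names rest = some (rest.foldl mergeL names) := by
  induction rest with
  | nil => intro names _ _ _; rfl
  | cons l rest ih =>
    intro names hlen hc hp
    have hl : l.length = names.length := hlen l (by simp)
    have hz := aZip_eq names l (fun i => hc i l (by simp))
    have hlen' : ∀ l' ∈ rest, l'.length = (mergeL names l).length := by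
      intro l' hl'; rw [mergeL_len names l hl]; exact hlen l' (by simp [hl'])
    have hc' : ∀ i, ∀ l' ∈ rest, compat ((mergeL names l).getD i none) (l'.getD i none) := by
      intro i l' hl'
      rw [mergeL_getD names l hl]
      exact compat_merge2_left _ _ _ (hc i l' (by simp [hl'])) (hp i l (by simp) l' (by simp [hl']))
    have hp' : ∀ i, ∀ l1 ∈ rest, ∀ l2 ∈ rest, compat (l1.getD i none) (l2.getD i none) := by
      intro i l1 h1 l2 h2; exact hp i l1 (by simp [h1]) l2 (by simp [h2])
    simp [aLoop, hl, hz, ih (mergeL names l) hlen' hc' hp']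

lemma foldl_mergeL_len (rest : List (List (Option String))) : ∀ (names : List (Option String)),
    (∀ l ∈ rest, l.length = names.length) →
    (rest.foldl mergeL names).length = names.length := by
  induction rest with
  | nil => intro names _; rfl
  | cons l rest ih =>
    intro names hlen
    have hl : l.length = names.length := hlen l (by simp)
    rw [List.foldl_cons, ih (mergeL names l)
      (fun l' hl' => by rw [mergeL_len names l hl]; exact hlen l' (by simp [hl'])),
      mergeL_len names l hl]

lemma foldl_mergeL_getD (rest : List (List (Option String))) : ∀ (names : List (Option String)) (i : ℕ),
    (∀ l ∈ rest, l.length = names.length) →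
    (rest.foldl mergeL names).getD i none = colFind i (names :: rest) := by
  induction rest with
  | nil =>
    intro names i _
    simp only [List.foldl_nil, colFind]
    cases names.getD i none <;> rfl
  | cons l rest ih =>
    intro names i hlen
    have hl : l.length = names.length := hlen l (by simp)
    rw [List.foldl_cons, ih (mergeL names l) i
      (fun l' hl' => by rw [mergeL_len names l hl]; exact hlen l' (by simp [hl']))]
    show colFind i (mergeL names l :: rest) = colFind i (names :: l :: rest)
    simp only [colFind]
    rw [mergeL_getD names l hl, merge2_assoc]

lemma bCol_some (col : List (Option String)) : ∀ (s : String),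
    (∀ t, some t ∈ col → t = s) → bCol (some s) col = some (some s) := by
  induction col with
  | nil => intro s _; rfl
  | cons v rest ih =>
    intro s h
    cases v with
    | none => exact ih s (fun t ht => h t (by simp [ht]))
    | some t =>
      have : t = s := h t (by simp)
      simp [bCol, this, ih s (fun t' ht' => h t' (by simp [ht']))]

lemma bCol_none (col : List (Option String))
    (h : ∀ s t, some s ∈ col → some t ∈ col → s = t) :
    bCol none col = some (firstSome col) := by
  induction col with
  | nil => rfl
  | cons v rest ih =>
    cases v with
    | none =>
      simp only [bCol, firstSome, merge2]
      exact ih (fun s t hs ht => h s t (by simp [hs]) (by simp [ht]))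
    | some s =>
      simp only [bCol, firstSome, merge2]
      exact bCol_some rest s (fun t ht => h t s (by simp [ht]) (by simp))

lemma firstSome_map (i : ℕ) (outs : List (List (Option String))) :
    firstSome (outs.map (fun l => l.getD i none)) = colFind i outs := by
  induction outs with
  | nil => rfl
  | cons l rest ih => simp only [List.map_cons, firstSome, colFind, ih]

lemma mapM_some (f : ℕ → Option (Option String)) (g : ℕ → Option String) :
    ∀ xs : List ℕ, (∀ x ∈ xs, f x = some (g x)) → xs.mapM f = some (xs.map g) := by
  intro xs
  induction xs with
  | nil => intro _; rfl
  | cons x xs ih =>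
    intro h
    rw [List.mapM_cons, h x (by simp), ih (fun y hy => h y (by simp [hy]))]
    rfl

-- ===== VERDICT (by name: the statement is the Claim_ definition above) =====
theorem get_return_names_py_spec : Claim_equal_get_return_names_py := by
  intro outs _ hpre
  unfold Spec_get_return_names_py
  match outs with
  | [] => rfl
  | [x] => rfl
  | x :: l0 :: rest0 =>
    obtain ⟨hlen, hcol⟩ := hpre
    simp only [List.headD_cons] at hlen hcol
    set rest := l0 :: rest0 with hrest
    -- unbounded pairwise compatibility of all columns
    have hcompat : ∀ i, ∀ l1 ∈ (x :: rest), ∀ l2 ∈ (x :: rest),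
        compat (l1.getD i none) (l2.getD i none) := by
      intro i l1 h1 l2 h2
      by_cases hi : i < x.length
      · exact hcol i (List.mem_range.mpr hi) l1 h1 l2 h2
      · left; exact getD_of_len_le l1 i (by rw [hlen l1 h1]; omega)
    -- A's side
    have hrlen : ∀ l ∈ rest, l.length = x.length :=
      fun l hl => hlen l (by simp [hrest] at hl ⊢; tauto)
    have hA : aLoop x rest = some (rest.foldl mergeL x) :=
      aLoop_eq rest x hrlen
        (fun i l hl => hcompat i x (by simp) l (by simp [hrest] at hl ⊢; tauto))
        (fun i l1 h1 l2 h2 => hcompat i l1 (by simp [hrest] at h1 ⊢; tauto)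
          l2 (by simp [hrest] at h2 ⊢; tauto))
    -- B's side
    have hany : ((x :: rest).any (fun l => l.length != x.length)) = false := by
      simp only [List.any_eq_false, bne_iff_ne, ne_eq, not_not]
      exact fun l hl => hlen l hl
    have hBcol : ∀ i ∈ List.range x.length,
        bCol none ((x :: rest).map (fun l => l.getD i none)) = some (colFind i (x :: rest)) := by
      intro i _
      rw [← firstSome_map i (x :: rest)]
      apply bCol_none
      intro s t hs ht
      simp only [List.mem_map] at hs ht
      obtain ⟨l1, h1, e1⟩ := hs
      obtain ⟨l2, h2, e2⟩ := ht
      rcases hcompat i l1 h1 l2 h2 with h | h | h <;> simp_all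
    have hB := mapM_some _ (fun i => colFind i (x :: rest)) (List.range x.length) hBcol
    have hBeq : get_return_names_py_alt (x :: rest) =
        (List.range x.length).map (fun i => colFind i (x :: rest)) := by
      show (if ((x :: rest).any fun l => l.length != x.length) = true then []
        else ((List.range x.length).mapM
          (fun i => bCol none ((x :: rest).map (fun l => l.getD i none)))).getD []) = _
      rw [hany, if_neg (by simp), hB, Option.getD_some]
    show (aLoop x rest).getD [] = _
    rw [hA, Option.getD_some, hBeq]
    apply List.ext_getElem
    · rw [foldl_mergeL_len rest x hrlen]; simp
    · intro i h1 h2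
      have hgd := foldl_mergeL_getD rest x i hrlen
      rw [List.getD_eq_getElem _ _ h1] at hgd
      simp only [List.getElem_map, List.getElem_range, hgd]
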